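-- pv_equiv track=rewrite | github.com/voting-tools/pref_voting | pref_voting/generate_profiles.py | _weakorder_to_levels
-- ===== SOURCE A (Python) =====
-- def _weakorder_to_levels(order):
--     """Convert a weak order dict -> tuple of rank-levels."""
--     if not order:
--         return tuple()
--     max_rank = max(order.values())
--     return tuple(
--         tuple(sorted(c for c, r in order.items() if r == lev))
--         for lev in range(max_rank + 1)
--     )
-- ===== SOURCE B (Python) =====
-- def _weakorder_to_levels(order):
--     """Convert a weak order dict -> tuple of rank-levels (one bucketing pass, then sort each bucket)."""
--     if not order:
--         return tuple()
--     buckets = {}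
--     max_rank = None
--     for c, r in order.items():
--         if max_rank is None or r > max_rank:
--             max_rank = r
--         buckets.setdefault(r, []).append(c)
--     return tuple(tuple(sorted(buckets.get(lev, ()))) for lev in range(max_rank + 1))
-- ===== Notes on version B (the rewrite author's own statement) =====
-- stated objective: alternative
-- what changed: Instead of rescanning all items once per rank level, B makes a single pass bucketing candidates by rank into a dict while tracking the max rank, then sorts each bucket; it avoids A's per-level rescan but was not measurably faster on the timing inputs.
import Mathlib
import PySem

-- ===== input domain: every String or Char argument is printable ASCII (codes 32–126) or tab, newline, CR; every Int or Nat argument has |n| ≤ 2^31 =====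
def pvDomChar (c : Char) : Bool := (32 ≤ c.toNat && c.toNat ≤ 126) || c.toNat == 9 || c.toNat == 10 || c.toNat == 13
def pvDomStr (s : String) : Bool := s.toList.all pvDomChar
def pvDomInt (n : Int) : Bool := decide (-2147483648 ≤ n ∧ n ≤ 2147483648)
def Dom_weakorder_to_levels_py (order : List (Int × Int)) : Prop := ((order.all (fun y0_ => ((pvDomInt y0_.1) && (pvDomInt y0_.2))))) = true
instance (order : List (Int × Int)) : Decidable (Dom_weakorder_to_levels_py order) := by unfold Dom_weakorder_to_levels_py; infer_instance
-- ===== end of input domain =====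

-- B replaces A's per-level rescan of all items by one bucketing pass over the items plus a
-- sort per bucket (objective: alternative algorithm; not measured faster).


-- ===== PORT A =====
def weakorder_to_levels_py (order : List (Int × Int)) : List (List Int) :=
  if order = [] then []
  else
    match PySem.List.max? (order.map (·.2)) (fun x => x) with
    | none => []   -- unreachable: order ≠ []
    | some max_rank =>
      (PySem.List.pyRange 0 (max_rank + 1) 1).map (fun lev =>
        PySem.List.sorted ((order.filter (fun p => p.2 == lev)).map (·.1)) (fun x => x) false)

-- ===== PORT B =====
def weakorder_to_levels_py_alt (order : List (Int × Int)) : List (List Int) :=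
  if order = [] then []
  else
    let st := order.foldl
      (fun (acc : PySem.Dict Int (List Int) × Option Int) p =>
        let m := match acc.2 with
          | none => some p.2
          | some m => if p.2 > m then some p.2 else some m
        (acc.1.modify p.2 [] (· ++ [p.1]), m))
      (PySem.Dict.empty, none)
    match st.2 with
    | none => []   -- unreachable: order ≠ []
    | some max_rank =>
      (PySem.List.pyRange 0 (max_rank + 1) 1).map (fun lev =>
        PySem.List.sorted (st.1.getD lev []) (fun x => x) false)

-- ===== PRECONDITION & SPEC =====
def Spec_weakorder_to_levels_py (order : List (Int × Int)) (out : List (List Int)) : Prop := out = weakorder_to_levels_py_alt order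
instance (order : List (Int × Int)) (out : List (List Int)) : Decidable (Spec_weakorder_to_levels_py order out) := by unfold Spec_weakorder_to_levels_py; infer_instance

-- ===== CLAIM (what is proved, stated in full; the proofs are below) =====
def Claim_equal_weakorder_to_levels_py : Prop := ∀ (order : List (Int × Int)), Dom_weakorder_to_levels_py order → Spec_weakorder_to_levels_py order (weakorder_to_levels_py order)

-- ===== LEMMAS AND PROOFS =====

-- B's paired loop splits into its two independent components (bucket dict, running max).
theorem pv_fold_split (t : List (Int × Int)) (d : PySem.Dict Int (List Int)) (m : Int) :
    t.foldl
      (fun (acc : PySem.Dict Int (List Int) × Option Int) p =>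
        let m := match acc.2 with
          | none => some p.2
          | some m => if p.2 > m then some p.2 else some m
        (acc.1.modify p.2 [] (· ++ [p.1]), m))
      (d, some m)
    = (t.foldl (fun d p => d.modify p.2 [] (· ++ [p.1])) d,
       some (t.foldl (fun m p => if p.2 > m then p.2 else m) m)) := by
  induction t generalizing d m with
  | nil => rfl
  | cons h t ih =>
    have e : (if m < h.2 then some h.2 else some m) = some (if m < h.2 then h.2 else m) := by
      split_ifs <;> rfl
    simp only [List.foldl_cons, gt_iff_lt]
    simp only [e, ih]

-- the bucket for level c holds exactly the first components of the rank-c items, in order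
theorem pv_bucket (order : List (Int × Int)) (c : Int) :
    ((order.foldl (fun d p => d.modify p.2 [] (· ++ [p.1])) (PySem.Dict.empty)).getD c [])
      = (order.filter (fun p => p.2 == c)).map (·.1) := by
  have h := PySem.Dict.getD_foldl_modify_append (l := order.map Prod.swap)
      (d := (PySem.Dict.empty : PySem.Dict Int (List Int))) (c := c)
  rw [List.foldl_map] at h
  simpa [Prod.swap, List.filter_map, Function.comp] using h

theorem pv_max_eq (t : List (Int × Int)) (m : Int) :
    t.foldl (fun m p => if p.2 > m then p.2 else m) m
      = (t.map (·.2)).foldl max m := by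
  rw [List.foldl_map]
  congr 1
  funext a b
  rw [max_def]; split_ifs <;> omega

-- ===== VERDICT (by name: the statement is the Claim_ definition above) =====
theorem weakorder_to_levels_py_spec : Claim_equal_weakorder_to_levels_py := by
  unfold Claim_equal_weakorder_to_levels_py Spec_weakorder_to_levels_py
  intro order _
  unfold weakorder_to_levels_py weakorder_to_levels_py_alt
  cases order with
  | nil => rfl
  | cons h t =>
    simp only [List.foldl_cons, if_neg (List.cons_ne_nil h t)]
    rw [pv_fold_split]
    simp only [List.map_cons]
    rw [PySem.List.max?_id_cons]
    dsimp only
    rw [pv_max_eq]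
    apply List.map_congr_left
    intro lev _
    have hb := pv_bucket (h :: t) lev
    rw [List.foldl_cons] at hb
    rw [hb]
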